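-- pv_equiv track=rewrite | github.com/gabogara/week2_session1_2 | session1.py | num_popular_pairs
-- ===== SOURCE A (Python) =====
-- def num_popular_pairs(popularity_scores):
--     counts = {}
--
--     for score in popularity_scores:
--         if score in counts:
--             counts[score] += 1
--         else:
--             counts[score] = 1
--
--     total_pairs = 0
--     for n in counts.values():
--         total_pairs += (n * (n - 1)) // 2
--     return total_pairs
-- ===== SOURCE B (Python) =====
-- def num_popular_pairs(popularity_scores):
--     seen = {}
--     total = 0
--     for score in popularity_scores:
--         total += seen.get(score, 0)
--         seen[score] = seen.get(score, 0) + 1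
--     return total
-- ===== Notes on version B (the rewrite author's own statement) =====
-- stated objective: alternative
-- what changed: Single streaming pass: add the number of earlier equal elements to a running total as each score arrives, instead of building a full count table and then summing n*(n-1)//2 over it in a second pass.
import Mathlib
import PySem

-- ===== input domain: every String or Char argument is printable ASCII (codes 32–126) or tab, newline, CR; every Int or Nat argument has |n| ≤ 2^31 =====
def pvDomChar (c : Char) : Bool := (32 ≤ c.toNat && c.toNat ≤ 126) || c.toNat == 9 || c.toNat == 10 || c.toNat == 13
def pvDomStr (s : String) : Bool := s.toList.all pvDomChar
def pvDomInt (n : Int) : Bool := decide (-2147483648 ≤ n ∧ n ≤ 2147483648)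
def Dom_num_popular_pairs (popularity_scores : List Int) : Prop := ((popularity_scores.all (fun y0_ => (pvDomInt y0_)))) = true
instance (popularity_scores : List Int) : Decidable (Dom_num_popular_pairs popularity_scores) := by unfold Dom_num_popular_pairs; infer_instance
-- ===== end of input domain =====

-- B replaces A's count-then-combine (build a full counter, then sum n*(n-1)//2 over its
-- values) by one streaming pass that adds the number of earlier equal elements; same cost.

-- ===== PORT A =====
def num_popular_pairs (popularity_scores : List Int) : Int :=
  let counts := popularity_scores.foldl
    (fun (d : PySem.Dict Int Int) score =>
      if d.contains score then d.insert score (d.getD score 0 + 1)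
      else d.insert score 1)
    PySem.Dict.empty
  counts.values.foldl (fun total_pairs n => total_pairs + PySem.Int.floordiv (n * (n - 1)) 2) 0

-- ===== PORT B =====
def num_popular_pairs_alt (popularity_scores : List Int) : Int :=
  (popularity_scores.foldl
    (fun (st : PySem.Dict Int Int × Int) score =>
      (st.1.insert score (st.1.getD score 0 + 1), st.2 + st.1.getD score 0))
    (PySem.Dict.empty, 0)).2

-- ===== PRECONDITION & SPEC =====
def Spec_num_popular_pairs (popularity_scores : List Int) (out : Int) : Prop := out = num_popular_pairs_alt popularity_scores
instance (popularity_scores : List Int) (out : Int) : Decidable (Spec_num_popular_pairs popularity_scores out) := by unfold Spec_num_popular_pairs; infer_instance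

-- ===== CLAIM (what is proved, stated in full; the proofs are below) =====
def Claim_equal_num_popular_pairs : Prop := ∀ (popularity_scores : List Int), Dom_num_popular_pairs popularity_scores → Spec_num_popular_pairs popularity_scores (num_popular_pairs popularity_scores)

-- ===== LEMMAS AND PROOFS =====

-- C(n,2) as the ports compute it
def c2 (n : Int) : Int := PySem.Int.floordiv (n * (n - 1)) 2

-- the common mathematical value: sum of C(count k, 2) over the distinct elements of l
def Gsum (l : List Int) : Int :=
  ((PySem.Set.ofList l).map (fun k => c2 (l.count k : Int))).sum

theorem c2_succ (n : Int) : c2 (n + 1) = c2 n + n := by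
  unfold c2
  rw [PySem.Int.floordiv_eq_ediv_of_pos (by norm_num), PySem.Int.floordiv_eq_ediv_of_pos (by norm_num)]
  obtain ⟨k, hk⟩ := Int.even_mul_succ_self n
  obtain ⟨m, hm⟩ := Int.even_mul_succ_self (n - 1)
  have h1 : (n + 1) * ((n + 1) - 1) = 2 * k := by linear_combination hk
  have h2 : n * (n - 1) = 2 * m := by linear_combination hm
  rw [h1, h2, Int.mul_ediv_cancel_left _ (by norm_num), Int.mul_ediv_cancel_left _ (by norm_num)]
  have h1' : n * n + n = 2 * k := by linear_combination h1
  have h2' : n * n - n = 2 * m := by linear_combination h2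
  linarith

theorem sum_map_update (f g : Int → Int) :
    ∀ (ks : List Int), ks.Nodup → ∀ x, x ∈ ks → (∀ k ∈ ks, k ≠ x → f k = g k) →
    (ks.map f).sum = (ks.map g).sum + (f x - g x) := by
  intro ks
  induction ks with
  | nil => intro _ x hx _; simp at hx
  | cons k ks ih =>
    intro hnd x hx hfg
    by_cases hk : k = x
    · subst hk
      have hnot : k ∉ ks := (List.nodup_cons.mp hnd).1
      have hmap : ks.map f = ks.map g := by
        apply List.map_congr_left
        intro a ha
        exact hfg a (List.mem_cons_of_mem _ ha) (fun h => hnot (h ▸ ha))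
      simp [hmap]; ring
    · have hx' : x ∈ ks := by
        cases List.mem_cons.mp hx with
        | inl h => exact absurd h.symm hk
        | inr h => exact h
      have hfk : f k = g k := hfg k List.mem_cons_self (fun h => hk h)
      have := ih (List.nodup_cons.mp hnd).2 x hx'
        (fun a ha hne => hfg a (List.mem_cons_of_mem _ ha) hne)
      simp [hfk, this]; ring

theorem ofList_append_singleton (ys : List Int) (x : Int) :
    PySem.Set.ofList (ys ++ [x]) =
      if x ∈ ys then PySem.Set.ofList ys else PySem.Set.ofList ys ++ [x] := by
  show List.foldl PySem.Set.add PySem.Set.empty (ys ++ [x]) = _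
  rw [List.foldl_append]
  show PySem.Set.add (PySem.Set.ofList ys) x = _
  unfold PySem.Set.add
  have h : PySem.Set.contains (PySem.Set.ofList ys) x = true ↔ x ∈ ys := by
    simp [PySem.Set.contains, PySem.Set.mem_ofList]
  by_cases hx : x ∈ ys
  · simp [hx]
  · have : ¬ (PySem.Set.ofList ys).contains x = true := fun hc => hx (h.mp hc)
    simp [this, hx]

theorem Gsum_append_singleton (ys : List Int) (x : Int) :
    Gsum (ys ++ [x]) = Gsum ys + (ys.count x : Int) := by
  unfold Gsum
  rw [ofList_append_singleton]
  by_cases hx : x ∈ ys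
  · simp only [hx, if_true]
    have hupd := sum_map_update
      (fun k => c2 (((ys ++ [x]).count k : Nat) : Int))
      (fun k => c2 ((ys.count k : Nat) : Int))
      (PySem.Set.ofList ys) (PySem.Set.nodup_ofList ys) x
      ((PySem.Set.mem_ofList ys x).mpr hx)
      (by
        intro k _ hk
        have : (ys ++ [x]).count k = ys.count k := by
          simp [List.count_append, List.count_singleton]
          intro h; exact absurd h.symm hk
        simp only [this])
    rw [hupd]
    simp only
    have hc : (ys ++ [x]).count x = ys.count x + 1 := by
      simp [List.count_append]
    rw [hc]
    push_cast
    rw [c2_succ]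
    ring
  · simp only [hx, if_false]
    rw [List.map_append, List.sum_append]
    have hcx : (ys ++ [x]).count x = ys.count x + 1 := by
      simp [List.count_append]
    have hcy : ys.count x = 0 := List.count_eq_zero.mpr hx
    have hmap : (PySem.Set.ofList ys).map (fun k => c2 (((ys ++ [x]).count k : Nat) : Int))
        = (PySem.Set.ofList ys).map (fun k => c2 ((ys.count k : Nat) : Int)) := by
      apply List.map_congr_left
      intro k hk
      have hkx : k ≠ x := fun h => hx (h ▸ (PySem.Set.mem_ofList ys k).mp hk)
      have : (ys ++ [x]).count k = ys.count k := by
        simp [List.count_append, List.count_singleton]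
        intro h; exact absurd h.symm hkx
      simp only [this]
    rw [hmap]
    have hone : c2 1 = 0 := by decide
    simp [hcy, hone]

theorem foldl_add_c2 : ∀ (L : List Int) (a : Int),
    L.foldl (fun t n => t + PySem.Int.floordiv (n * (n - 1)) 2) a = a + (L.map c2).sum := by
  intro L
  induction L with
  | nil => simp
  | cons n L ih =>
    intro a
    rw [List.foldl_cons, ih]
    simp only [List.map_cons, List.sum_cons, c2]
    ring

theorem A_eq_Gsum (l : List Int) : num_popular_pairs l = Gsum l := by
  have hstep : (fun (d : PySem.Dict Int Int) score =>
      if d.contains score then d.insert score (d.getD score 0 + 1)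
      else d.insert score 1)
      = fun (d : PySem.Dict Int Int) score => d.insert score (d.getD score 0 + 1) := by
    funext d s
    cases h : d.contains s with
    | true => simp
    | false => simp [PySem.Dict.getD_of_not_contains d 0 h]
  show List.foldl (fun total_pairs n => total_pairs + PySem.Int.floordiv (n * (n - 1)) 2) 0
      (List.foldl (fun (d : PySem.Dict Int Int) score =>
        if d.contains score then d.insert score (d.getD score 0 + 1)
        else d.insert score 1) PySem.Dict.empty l).values = Gsum l
  rw [hstep, PySem.Dict.foldl_insert_getD_add_one_eq_counter,
      PySem.Dict.values_eq_map_keys _ (PySem.Dict.nodup_keys_counter l) 0,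
      PySem.Dict.keys_counter, foldl_add_c2, List.map_map]
  simp only [zero_add]
  unfold Gsum
  congr 1
  apply List.map_congr_left
  intro k _
  simp [Function.comp, PySem.Dict.getD_counter]

theorem B_inv : ∀ (xs ys : List Int) (t : Int),
    ((xs.foldl
      (fun (st : PySem.Dict Int Int × Int) score =>
        (st.1.insert score (st.1.getD score 0 + 1), st.2 + st.1.getD score 0))
      (PySem.Dict.counter ys, t)).2) + Gsum ys = t + Gsum (ys ++ xs) := by
  intro xs
  induction xs with
  | nil => intro ys t; simp
  | cons x xs ih =>
    intro ys t
    rw [List.foldl_cons]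
    have hdict : (PySem.Dict.counter ys).insert x ((PySem.Dict.counter ys).getD x 0 + 1)
        = PySem.Dict.counter (ys ++ [x]) := by
      rw [← PySem.Dict.foldl_insert_getD_add_one_eq_counter (ys ++ [x]),
          List.foldl_append, PySem.Dict.foldl_insert_getD_add_one_eq_counter ys]
      simp
    simp only [hdict]
    have hih := ih (ys ++ [x]) (t + (PySem.Dict.counter ys).getD x 0)
    rw [List.append_assoc] at hih
    simp only [List.singleton_append] at hih
    have h2 := Gsum_append_singleton ys x
    have h3 := PySem.Dict.getD_counter ys x
    linarith [hih, h2, h3]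

theorem B_eq_Gsum (l : List Int) : num_popular_pairs_alt l = Gsum l := by
  unfold num_popular_pairs_alt
  have h0 : (PySem.Dict.empty : PySem.Dict Int Int) = PySem.Dict.counter [] := rfl
  rw [h0]
  have := B_inv l [] 0
  have hnil : Gsum [] = 0 := by simp [Gsum, PySem.Set.ofList]
  rw [hnil] at this
  simpa using this

-- ===== VERDICT (by name: the statement is the Claim_ definition above) =====
theorem num_popular_pairs_spec : Claim_equal_num_popular_pairs := by
  intro l _
  unfold Spec_num_popular_pairs
  rw [A_eq_Gsum, B_eq_Gsum]
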